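-- pv_equiv track=rewrite | github.com/Effyee/codingtestPython | 프로그래머스/2/138476. 귤 고르기/귤 고르기.py | solution
-- ===== SOURCE A (Python) =====
-- from collections import Counter
--
-- def solution(k, tangerine):
--     answer = 0
--     box = Counter(tangerine)  # 귤 종류별 수를 세기 위해 Counter 사용
--     counts = sorted(box.values(), reverse=True)  # 귤의 수를 내림차순으로 정렬
--
--     for count in counts:
--         answer += 1  # 종류 수 증가
--         k -= count  # 현재 종류의 귤 개수만큼 빼기
--         if k <= 0:  # k가 0 이하가 되면 종료
--             break
--
--     return answer
-- ===== SOURCE B (Python) =====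
-- from collections import Counter
-- from itertools import accumulate
-- from bisect import bisect_left
--
--
-- def solution(k, tangerine):
--     counts = sorted(Counter(tangerine).values(), reverse=True)
--     prefix = list(accumulate(counts))
--     i = bisect_left(prefix, k)
--     return min(i + 1, len(counts))
-- ===== Notes on version B (the rewrite author's own statement) =====
-- stated objective: alternative
-- what changed: Replaces A's greedy subtraction loop with early break by computing prefix sums of the descending counts (itertools.accumulate) and locating the first prefix sum >= k with bisect_left, clamping to the number of types.
import Mathlib
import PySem

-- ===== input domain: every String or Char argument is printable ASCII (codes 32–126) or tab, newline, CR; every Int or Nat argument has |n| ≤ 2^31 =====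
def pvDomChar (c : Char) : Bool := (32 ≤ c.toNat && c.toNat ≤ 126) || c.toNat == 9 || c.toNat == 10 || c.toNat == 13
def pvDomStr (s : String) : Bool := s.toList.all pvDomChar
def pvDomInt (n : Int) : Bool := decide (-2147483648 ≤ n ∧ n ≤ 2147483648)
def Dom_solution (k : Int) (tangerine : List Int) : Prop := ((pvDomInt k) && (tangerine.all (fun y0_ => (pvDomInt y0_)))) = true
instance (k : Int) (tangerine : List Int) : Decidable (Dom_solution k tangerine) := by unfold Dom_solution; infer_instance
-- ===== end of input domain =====

-- B replaces A's greedy subtraction loop by prefix sums plus a binary search (bisect_left); objective: alternative decomposition.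

-- ===== PORT A =====
-- the 'for count in counts' accumulation loop with early break
def solLoopA (k : Int) (counts : List Int) (answer : Int) : Int :=
  match counts with
  | [] => answer
  | c :: rest =>
    let answer' := answer + 1
    let k' := k - c
    if k' ≤ 0 then answer' else solLoopA k' rest answer'

def solution (k : Int) (tangerine : List Int) : Int :=
  let box := PySem.Dict.counter tangerine
  let counts := PySem.List.sorted box.values (fun x => x) true
  solLoopA k counts 0

-- ===== PORT B =====
-- itertools.accumulate(counts): running sums, seeded with s
def accumList (counts : List Int) (s : Int) : List Int :=
  match counts with
  | [] => []
  | c :: rest => (s + c) :: accumList rest (s + c)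

def solution_alt (k : Int) (tangerine : List Int) : Int :=
  let counts := PySem.List.sorted (PySem.Dict.counter tangerine).values (fun x => x) true
  let pref := accumList counts 0
  let i := PySem.List.bisectLeft pref k
  min ((i : Int) + 1) (counts.length : Int)

-- ===== PRECONDITION & SPEC =====
def Spec_solution (k : Int) (tangerine : List Int) (out : Int) : Prop := out = solution_alt k tangerine
instance (k : Int) (tangerine : List Int) (out : Int) : Decidable (Spec_solution k tangerine out) := by unfold Spec_solution; infer_instance

-- ===== CLAIM (what is proved, stated in full; the proofs are below) =====
def Claim_equal_solution : Prop := ∀ (k : Int) (tangerine : List Int), Dom_solution k tangerine → Spec_solution k tangerine (solution k tangerine)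

-- ===== LEMMAS AND PROOFS =====

-- the branch structure of A's loop, with the accumulator factored out
def fA (k : Int) (counts : List Int) : Int :=
  match counts with
  | [] => 0
  | c :: rest => if k - c ≤ 0 then 1 else 1 + fA (k - c) rest

theorem solLoopA_eq_fA (counts : List Int) : ∀ (k a : Int),
    solLoopA k counts a = a + fA k counts := by
  induction counts with
  | nil => intro k a; simp [solLoopA, fA]
  | cons c rest ih =>
    intro k a
    simp only [solLoopA, fA]
    split_ifs with h
    · ring
    · rw [ih]; ring

theorem mem_accumList_ge (counts : List Int) : ∀ (s : Int),
    (∀ c ∈ counts, 0 ≤ c) → ∀ x ∈ accumList counts s, s ≤ x := by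
  induction counts with
  | nil => intro s _ x hx; simp [accumList] at hx
  | cons c rest ih =>
    intro s hpos x hx
    have hc : 0 ≤ c := hpos c (by simp)
    simp only [accumList, List.mem_cons] at hx
    rcases hx with rfl | hx
    · omega
    · have := ih (s + c) (fun d hd => hpos d (by simp [hd])) x hx
      omega

theorem pairwise_accumList (counts : List Int) : ∀ (s : Int),
    (∀ c ∈ counts, 0 ≤ c) → (accumList counts s).Pairwise (· ≤ ·) := by
  induction counts with
  | nil => intro s _; simp [accumList]
  | cons c rest ih =>
    intro s hpos
    have htail : ∀ d ∈ rest, 0 ≤ d := fun d hd => hpos d (by simp [hd])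
    simp only [accumList]
    exact List.Pairwise.cons (fun x hx => mem_accumList_ge rest (s + c) htail x hx)
      (ih (s + c) htail)

theorem countP_accumList_zero (counts : List Int) : ∀ (s k : Int),
    (∀ c ∈ counts, 0 ≤ c) → k ≤ s →
    (accumList counts s).countP (fun p => decide (p < k)) = 0 := by
  induction counts with
  | nil => intro s k _ _; simp [accumList]
  | cons c rest ih =>
    intro s k hpos hks
    have hc : 0 ≤ c := hpos c (by simp)
    simp only [accumList, List.countP_cons]
    rw [ih (s + c) k (fun d hd => hpos d (by simp [hd])) (by omega)]
    simp; omega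

-- core: A's loop count equals the clamped position of the first prefix sum ≥ k
theorem fA_eq_min_countP (counts : List Int) : ∀ (s k : Int),
    (∀ c ∈ counts, 0 ≤ c) →
    fA (k - s) counts =
      min (((accumList counts s).countP (fun p => decide (p < k)) : Int) + 1)
        (counts.length : Int) := by
  induction counts with
  | nil => intro s k _; simp [fA, accumList]
  | cons c rest ih =>
    intro s k hpos
    have hc : 0 ≤ c := hpos c (by simp)
    have htail : ∀ d ∈ rest, 0 ≤ d := fun d hd => hpos d (by simp [hd])
    simp only [fA, accumList, List.countP_cons, List.length_cons]
    by_cases h : k - s - c ≤ 0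
    · rw [if_pos (by omega)]
      rw [countP_accumList_zero rest (s + c) k htail (by omega)]
      simp; omega
    · rw [if_neg (by omega)]
      have : k - s - c = k - (s + c) := by ring
      rw [this, ih (s + c) k htail]
      have hb : ¬ (s + c < k) = False := by simp; omega
      simp only [decide_eq_true_eq]
      rw [if_pos (by omega)]
      push_cast
      omega

-- bisect_left on a nondecreasing list is the number of elements < x
theorem bisectLeft_eq_countP (xs : List Int) (x : Int)
    (hs : xs.Pairwise (· ≤ ·)) :
    PySem.List.bisectLeft xs x = xs.countP (fun p => decide (p < x)) := by
  obtain ⟨hle, hlt, hge⟩ := PySem.List.bisectLeft_spec xs x hs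
  set r := PySem.List.bisectLeft xs x with hr
  have hsplit : xs = xs.take r ++ xs.drop r := (List.take_append_drop r xs).symm
  rw [hsplit, List.countP_append]
  have h1 : (xs.take r).countP (fun p => decide (p < x)) = (xs.take r).length := by
    apply List.countP_eq_length.mpr
    intro a ha
    obtain ⟨j, hj, hja⟩ := List.mem_iff_getElem.mp ha
    have hjlen : j < xs.length := by
      have := hj; rw [List.length_take] at this; omega
    have hjr : j < r := by
      have := hj; rw [List.length_take] at this; omega
    have : (xs.take r)[j] = xs[j] := List.getElem_take
    rw [this] at hja
    subst hja
    simp only [decide_eq_true_eq]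
    exact hlt j hjlen hjr
  have h2 : (xs.drop r).countP (fun p => decide (p < x)) = 0 := by
    apply List.countP_eq_zero.mpr
    intro a ha
    obtain ⟨j, hj, hja⟩ := List.mem_iff_getElem.mp ha
    have hjlen : r + j < xs.length := by
      have := hj; rw [List.length_drop] at this; omega
    have : (xs.drop r)[j] = xs[r + j] := by
      rw [List.getElem_drop]
    rw [this] at hja
    subst hja
    simp only [decide_eq_true_eq, not_lt]
    exact hge (r + j) hjlen (by omega)
  rw [h1, h2, List.length_take]
  have := hle
  omega

-- every value of Counter(xs) is positive
theorem counter_values_pos (xs : List Int) :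
    ∀ v ∈ (PySem.Dict.counter xs).values, 0 < v := by
  intro v hv
  have hvals : (PySem.Dict.counter xs).values
      = ((PySem.Dict.counter xs).items).map (·.2) := rfl
  rw [hvals, PySem.Dict.items_counter, List.map_map] at hv
  obtain ⟨a, ha, hav⟩ := List.mem_map.mp hv
  have hmem : a ∈ xs := (PySem.Set.mem_ofList _ _).mp ha
  have : 0 < xs.count a := List.count_pos_iff.mpr hmem
  simp only [Function.comp] at hav
  omega

-- ===== VERDICT (by name: the statement is the Claim_ definition above) =====
theorem solution_spec : Claim_equal_solution := by
  intro k tangerine _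
  unfold Spec_solution solution solution_alt
  set counts := PySem.List.sorted (PySem.Dict.counter tangerine).values (fun x => x) true with hcounts
  have hpos : ∀ c ∈ counts, 0 ≤ c := by
    intro c hc
    rw [hcounts, PySem.List.mem_sorted] at hc
    exact le_of_lt (counter_values_pos tangerine c hc)
  have h1 := solLoopA_eq_fA counts k 0
  have h2 := fA_eq_min_countP counts 0 k hpos
  have h3 := bisectLeft_eq_countP (accumList counts 0) k
    (pairwise_accumList counts 0 hpos)
  simp only [sub_zero] at h2
  simp only []
  rw [h1, h2, ← h3]
  omega
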